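-- pv_equiv track=rewrite | github.com/anisches/aevum | src/agent.py | _parse_classify
-- ===== SOURCE A (Python) =====
-- def _parse_classify(text: str, fallback_input: str = "") -> tuple[str, str, str]:
--     type_ = intent = required = ""
--     for line in text.splitlines():
--         l = line.lower().strip()
--         if l.startswith("type:"):
--             type_ = line.split(":", 1)[1].strip()
--         elif l.startswith("intent:"):
--             intent = line.split(":", 1)[1].strip()
--         elif l.startswith("required:"):
--             required = line.split(":", 1)[1].strip()
--     return (
--         type_ or "query",
--         intent or fallback_input,
--         required or "address the message directly",
--     )
-- ===== SOURCE B (Python) =====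
-- def _parse_classify(text: str, fallback_input: str = "") -> tuple[str, str, str]:
--     def extract(prefix):
--         for line in reversed(text.splitlines()):
--             if line.lower().strip().startswith(prefix + ":"):
--                 return line.split(":", 1)[1].strip()
--         return ""
--     type_ = extract("type")
--     intent = extract("intent")
--     required = extract("required")
--     return (
--         type_ or "query",
--         intent or fallback_input,
--         required or "address the message directly",
--     )
-- ===== Notes on version B (the rewrite author's own statement) =====
-- stated objective: alternative
-- what changed: Replaces the single interleaved last-wins fold over the lines with a helper extract(prefix) that scans the reversed line list three times independently, returning the first match from the end.
import Mathlib
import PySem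

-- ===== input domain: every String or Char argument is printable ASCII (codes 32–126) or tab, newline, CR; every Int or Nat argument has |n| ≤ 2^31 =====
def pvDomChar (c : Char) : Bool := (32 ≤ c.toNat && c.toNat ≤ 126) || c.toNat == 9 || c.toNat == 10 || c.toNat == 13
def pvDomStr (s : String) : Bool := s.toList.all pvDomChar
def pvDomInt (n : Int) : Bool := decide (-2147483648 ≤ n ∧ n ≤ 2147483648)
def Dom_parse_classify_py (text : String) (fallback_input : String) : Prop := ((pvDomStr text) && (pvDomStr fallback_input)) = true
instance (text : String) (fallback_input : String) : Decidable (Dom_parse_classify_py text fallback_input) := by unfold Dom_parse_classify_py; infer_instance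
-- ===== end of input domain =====

-- ===== PORT A =====
-- B replaces A's single interleaved last-wins fold with three independent
-- reversed-line scans via a helper (alternative decomposition, same cost).

-- line.split(":", 1)[1].strip()  (both Pythons contain this exact expression;
-- the index is only evaluated under the startswith guard, where ':' is present)
def pvSplitVal (line : String) : String :=
  PySem.Str.strip ((PySem.List.pyGet? ((PySem.Str.splitMax? line ":" 1).getD []) 1).getD "")

-- Python `s or d` for strings
def pvOr (s d : String) : String := if s = "" then d else s

-- the body of A's for-loop, named for the proofs (literal transliteration)
def pvStepA (acc : String × String × String) (line : String) : String × String × String :=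
  let l := PySem.Str.strip (PySem.Str.lower line)
  if PySem.Str.startswith l "type:" then (pvSplitVal line, acc.2.1, acc.2.2)
  else if PySem.Str.startswith l "intent:" then (acc.1, pvSplitVal line, acc.2.2)
  else if PySem.Str.startswith l "required:" then (acc.1, acc.2.1, pvSplitVal line)
  else acc

def parse_classify_py (text : String) (fallback_input : String) : String × String × String :=
  let res := (PySem.Str.splitlines text).foldl pvStepA ("", "", "")
  (pvOr res.1 "query", pvOr res.2.1 fallback_input,
   pvOr res.2.2 "address the message directly")

-- ===== PORT B =====
-- extract's loop over reversed(text.splitlines()): first match from the end, '' if none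
def pvExtractGo (pfx : String) : List String → String
  | [] => ""
  | line :: rest =>
      if PySem.Str.startswith (PySem.Str.strip (PySem.Str.lower line)) pfx then
        pvSplitVal line
      else pvExtractGo pfx rest

def pvExtract (text : String) (pre : String) : String :=
  pvExtractGo (pre ++ ":") (PySem.Str.splitlines text).reverse

def parse_classify_py_alt (text : String) (fallback_input : String) : String × String × String :=
  let type_ := pvExtract text "type"
  let intent := pvExtract text "intent"
  let required := pvExtract text "required"
  (pvOr type_ "query", pvOr intent fallback_input,
   pvOr required "address the message directly")

-- ===== PRECONDITION & SPEC =====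
def Spec_parse_classify_py (text : String) (fallback_input : String) (out : String × String × String) : Prop := out = parse_classify_py_alt text fallback_input
instance (text : String) (fallback_input : String) (out : String × String × String) : Decidable (Spec_parse_classify_py text fallback_input out) := by unfold Spec_parse_classify_py; infer_instance

-- ===== CLAIM (what is proved, stated in full; the proofs are below) =====
def Claim_equal_parse_classify_py : Prop := ∀ (text : String) (fallback_input : String), Dom_parse_classify_py text fallback_input → Spec_parse_classify_py text fallback_input (parse_classify_py text fallback_input)

-- ===== LEMMAS AND PROOFS =====

-- first match (from the front) as an Option; proof-only helper
def pvGoOpt (pfx : String) : List String → Option String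
  | [] => none
  | line :: rest =>
      if PySem.Str.startswith (PySem.Str.strip (PySem.Str.lower line)) pfx then
        some (pvSplitVal line)
      else pvGoOpt pfx rest

lemma pvExtractGo_eq (pfx : String) (ls : List String) :
    pvExtractGo pfx ls = (pvGoOpt pfx ls).getD "" := by
  induction ls with
  | nil => rfl
  | cons line rest ih =>
      simp only [pvExtractGo, pvGoOpt]
      split <;> simp [ih]

lemma pvGoOpt_append (pfx : String) (l1 l2 : List String) :
    pvGoOpt pfx (l1 ++ l2) = (pvGoOpt pfx l1).or (pvGoOpt pfx l2) := by
  induction l1 with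
  | nil => simp [pvGoOpt]
  | cons line rest ih =>
      simp only [List.cons_append, pvGoOpt]
      split <;> simp [ih]

lemma pvOr_getD {α : Type} (a b : Option α) (d : α) :
    (a.or b).getD d = a.getD (b.getD d) := by
  cases a <;> simp

-- a nonempty prefix determines the first character
lemma pvHead_of_prefix {p s : List Char} (h : p <+: s) (hp : p ≠ []) :
    s.head? = p.head? := by
  rcases h with ⟨t, rfl⟩
  cases p with
  | nil => exact absurd rfl hp
  | cons c cs => rfl

-- the three markers are mutually exclusive: distinct first characters
lemma pvExcl {s : List Char} (p q : List Char) (hne : p.head? ≠ q.head?) (hp : p ≠ [])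
    (hq : q ≠ []) (h : PySem.Chars.startswith s p = true) :
    PySem.Chars.startswith s q = false := by
  by_contra hqq
  rw [Bool.not_eq_false] at hqq
  have h1 := pvHead_of_prefix ((PySem.Chars.startswith_iff _ _).mp h) hp
  have h2 := pvHead_of_prefix ((PySem.Chars.startswith_iff _ _).mp hqq) hq
  exact hne (h1 ▸ h2 ▸ rfl)

-- the fold with triple state equals three reversed first-match scans
lemma pvFold_eq (ls : List String) (t i r : String) :
    ls.foldl pvStepA (t, i, r) =
      ((pvGoOpt "type:" ls.reverse).getD t,
       (pvGoOpt "intent:" ls.reverse).getD i,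
       (pvGoOpt "required:" ls.reverse).getD r) := by
  induction ls generalizing t i r with
  | nil => simp [pvGoOpt]
  | cons line rest ih =>
      have hrev : (line :: rest).reverse = rest.reverse ++ [line] := by simp
      rw [List.foldl_cons, hrev, pvGoOpt_append, pvGoOpt_append, pvGoOpt_append,
          pvOr_getD, pvOr_getD, pvOr_getD]
      by_cases hT : PySem.Chars.startswith
          (PySem.Chars.strip (PySem.Chars.lower line.toList)) ['t','y','p','e',':'] = true
      · have hI := pvExcl ['t','y','p','e',':'] ['i','n','t','e','n','t',':']
          (by decide) (by decide) (by decide) hT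
        have hR := pvExcl ['t','y','p','e',':'] ['r','e','q','u','i','r','e','d',':']
          (by decide) (by decide) (by decide) hT
        have hstep : pvStepA (t, i, r) line = (pvSplitVal line, i, r) := by
          simp [pvStepA, PySem.Str.startswith_eq, hT]
        rw [hstep, ih]
        simp [pvGoOpt, PySem.Str.startswith_eq, hT, hI, hR]
      · by_cases hI : PySem.Chars.startswith
            (PySem.Chars.strip (PySem.Chars.lower line.toList)) ['i','n','t','e','n','t',':'] = true
        · have hR := pvExcl ['i','n','t','e','n','t',':'] ['r','e','q','u','i','r','e','d',':']
            (by decide) (by decide) (by decide) hI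
          have hstep : pvStepA (t, i, r) line = (t, pvSplitVal line, r) := by
            simp [pvStepA, PySem.Str.startswith_eq, hT, hI]
          rw [hstep, ih]
          simp [pvGoOpt, PySem.Str.startswith_eq, hT, hI, hR]
        · by_cases hR : PySem.Chars.startswith
              (PySem.Chars.strip (PySem.Chars.lower line.toList)) ['r','e','q','u','i','r','e','d',':'] = true
          · have hstep : pvStepA (t, i, r) line = (t, i, pvSplitVal line) := by
              simp [pvStepA, PySem.Str.startswith_eq, hT, hI, hR]
            rw [hstep, ih]
            simp [pvGoOpt, PySem.Str.startswith_eq, hT, hI, hR]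
          · have hstep : pvStepA (t, i, r) line = (t, i, r) := by
              simp [pvStepA, PySem.Str.startswith_eq, hT, hI, hR]
            rw [hstep, ih]
            simp [pvGoOpt, PySem.Str.startswith_eq, hT, hI, hR]

lemma pvCat_type : ("type" ++ ":" : String) = "type:" := by decide
lemma pvCat_intent : ("intent" ++ ":" : String) = "intent:" := by decide
lemma pvCat_required : ("required" ++ ":" : String) = "required:" := by decide

-- ===== VERDICT (by name: the statement is the Claim_ definition above) =====
theorem parse_classify_py_spec : Claim_equal_parse_classify_py := by
  intro text fallback_input _
  unfold Spec_parse_classify_py parse_classify_py parse_classify_py_alt pvExtract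
  rw [pvFold_eq, pvCat_type, pvCat_intent, pvCat_required,
      pvExtractGo_eq, pvExtractGo_eq, pvExtractGo_eq]
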